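-- pv_equiv track=rewrite | github.com/jackleehzh/Python | math/万年历.py | days_in_years
-- ===== SOURCE A (Python) =====
-- def is_leap_year(year):
--     if year % 4 == 0 and year % 100 != 0 or year % 400 == 0:
--         return True
--     return False
--
-- def days_in_years(year1, year2):
--     days = 0
--     for year in range(year1, year2):
--         if is_leap_year(year):
--             days += 366
--         else:
--             days += 365
--     return days
-- ===== SOURCE B (Python) =====
-- def days_in_years(year1, year2):
--     # Closed form: 365 per year plus one extra day per leap year in [year1, year2),
--     # counted by floor-division (multiples of 4, minus 100, plus 400).
--     if year2 <= year1:
--         return 0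
--     def leaps(y):
--         return y // 4 - y // 100 + y // 400
--     return 365 * (year2 - year1) + leaps(year2 - 1) - leaps(year1 - 1)
-- ===== Notes on version B (the rewrite author's own statement) =====
-- stated objective: faster
-- what changed: Replaced the per-year loop summing 365/366 by a closed-form formula: 365*(year2-year1) plus a leap-year count obtained from floor-divisions by 4, 100 and 400 at the interval ends.
import Mathlib
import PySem

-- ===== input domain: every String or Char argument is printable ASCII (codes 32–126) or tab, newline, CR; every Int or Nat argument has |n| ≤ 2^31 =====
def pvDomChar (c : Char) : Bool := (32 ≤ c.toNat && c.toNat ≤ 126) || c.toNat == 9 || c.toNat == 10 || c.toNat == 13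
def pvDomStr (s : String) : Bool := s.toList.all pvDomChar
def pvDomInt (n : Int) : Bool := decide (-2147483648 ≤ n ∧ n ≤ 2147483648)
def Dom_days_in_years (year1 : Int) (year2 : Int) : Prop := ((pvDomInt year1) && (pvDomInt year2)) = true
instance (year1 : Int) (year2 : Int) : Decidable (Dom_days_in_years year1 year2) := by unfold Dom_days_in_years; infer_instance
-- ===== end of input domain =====

-- B replaces A's per-year loop by an O(1) closed-form (365*span plus a floor-division leap count).


-- ===== PORT A =====
def is_leap_year (year : Int) : Bool :=
  if (PySem.Int.mod year 4 == 0 && PySem.Int.mod year 100 != 0) || PySem.Int.mod year 400 == 0 then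
    true
  else
    false

def days_in_years (year1 : Int) (year2 : Int) : Int :=
  (PySem.List.pyRange year1 year2 1).foldl
    (fun days year => if is_leap_year year then days + 366 else days + 365) 0

-- ===== PORT B =====
def pvLeaps (y : Int) : Int :=
  PySem.Int.floordiv y 4 - PySem.Int.floordiv y 100 + PySem.Int.floordiv y 400

def days_in_years_alt (year1 : Int) (year2 : Int) : Int :=
  if year2 ≤ year1 then 0
  else 365 * (year2 - year1) + pvLeaps (year2 - 1) - pvLeaps (year1 - 1)

-- ===== PRECONDITION & SPEC =====
def Spec_days_in_years (year1 : Int) (year2 : Int) (out : Int) : Prop := out = days_in_years_alt year1 year2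
instance (year1 : Int) (year2 : Int) (out : Int) : Decidable (Spec_days_in_years year1 year2 out) := by unfold Spec_days_in_years; infer_instance

-- ===== CLAIM (what is proved, stated in full; the proofs are below) =====
def Claim_equal_days_in_years : Prop := ∀ (year1 : Int) (year2 : Int), Dom_days_in_years year1 year2 → Spec_days_in_years year1 year2 (days_in_years year1 year2)

-- ===== LEMMAS AND PROOFS =====

-- one step of the leap count: pvLeaps y - pvLeaps (y-1) is 1 exactly on leap years
theorem pvLeaps_step (y : Int) :
    (if is_leap_year y then (366:Int) else 365) = 365 + (pvLeaps y - pvLeaps (y - 1)) := by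
  have h4 : PySem.Int.floordiv y 4 = y / 4 := PySem.Int.floordiv_eq_ediv_of_pos (by norm_num)
  have h100 : PySem.Int.floordiv y 100 = y / 100 := PySem.Int.floordiv_eq_ediv_of_pos (by norm_num)
  have h400 : PySem.Int.floordiv y 400 = y / 400 := PySem.Int.floordiv_eq_ediv_of_pos (by norm_num)
  have g4 : PySem.Int.floordiv (y-1) 4 = (y-1) / 4 := PySem.Int.floordiv_eq_ediv_of_pos (by norm_num)
  have g100 : PySem.Int.floordiv (y-1) 100 = (y-1) / 100 := PySem.Int.floordiv_eq_ediv_of_pos (by norm_num)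
  have g400 : PySem.Int.floordiv (y-1) 400 = (y-1) / 400 := PySem.Int.floordiv_eq_ediv_of_pos (by norm_num)
  have m4 : PySem.Int.mod y 4 = y % 4 := PySem.Int.mod_eq_emod_of_pos (by norm_num)
  have m100 : PySem.Int.mod y 100 = y % 100 := PySem.Int.mod_eq_emod_of_pos (by norm_num)
  have m400 : PySem.Int.mod y 400 = y % 400 := PySem.Int.mod_eq_emod_of_pos (by norm_num)
  by_cases hc : y % 4 = 0 ∧ y % 100 ≠ 0 ∨ y % 400 = 0
  · have hb : is_leap_year y = true := by
      unfold is_leap_year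
      split
      · rfl
      · rename_i hneg
        exfalso
        simp only [m4, m100, m400, Bool.or_eq_true, Bool.and_eq_true, beq_iff_eq,
          bne_iff_ne, ne_eq] at hneg
        omega
    rw [hb]
    simp only [if_true, pvLeaps, h4, h100, h400, g4, g100, g400]
    omega
  · have hb : is_leap_year y = false := by
      unfold is_leap_year
      split
      · rename_i hpos
        exfalso
        simp only [m4, m100, m400, Bool.or_eq_true, Bool.and_eq_true, beq_iff_eq,
          bne_iff_ne, ne_eq] at hpos
        omega
      · rfl
    rw [hb]
    simp only [Bool.false_eq_true, if_false, pvLeaps, h4, h100, h400, g4, g100, g400]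
    omega

theorem days_loop (n : Nat) : ∀ (a : Int) (acc : Int),
    (PySem.List.pyRange a (a + n) 1).foldl
      (fun days year => if is_leap_year year then days + 366 else days + 365) acc
    = acc + 365 * n + (pvLeaps (a + n - 1) - pvLeaps (a - 1)) := by
  induction n with
  | zero =>
    intro a acc
    rw [PySem.List.pyRange_one_eq_nil (by omega)]
    simp
  | succ k ih =>
    intro a acc
    have hcons : PySem.List.pyRange a (a + (k+1:Nat)) 1 = a :: PySem.List.pyRange (a+1) (a + (k+1:Nat)) 1 :=
      PySem.List.pyRange_one_cons (by push_cast; omega)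
    have harg : a + ((k:Int)+1) = (a+1) + k := by ring
    rw [hcons]
    simp only [List.foldl_cons]
    push_cast
    rw [harg, ih (a+1)]
    have hstep := pvLeaps_step a
    split_ifs at hstep ⊢ with h
    · have : a + 1 + (k:Int) - 1 = a + ((k:Int)+1) - 1 := by ring
      rw [this]
      have : a + 1 - 1 = a := by ring
      rw [this]
      omega
    · have : a + 1 + (k:Int) - 1 = a + ((k:Int)+1) - 1 := by ring
      rw [this]
      have : a + 1 - 1 = a := by ring
      rw [this]
      omega

-- ===== VERDICT (by name: the statement is the Claim_ definition above) =====
theorem days_in_years_spec : Claim_equal_days_in_years := by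
  intro year1 year2 _
  unfold Spec_days_in_years days_in_years days_in_years_alt
  by_cases h : year2 ≤ year1
  · rw [PySem.List.pyRange_one_eq_nil h]
    simp [h]
  · have hn : year2 = year1 + ((year2 - year1).toNat : Int) := by omega
    rw [if_neg h]
    calc (PySem.List.pyRange year1 year2 1).foldl
          (fun days year => if is_leap_year year then days + 366 else days + 365) 0
        = (PySem.List.pyRange year1 (year1 + ((year2 - year1).toNat : Int)) 1).foldl
          (fun days year => if is_leap_year year then days + 366 else days + 365) 0 := by rw [← hn]
      _ = 0 + 365 * ((year2 - year1).toNat : Int) + (pvLeaps (year1 + ((year2 - year1).toNat : Int) - 1) - pvLeaps (year1 - 1)) :=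
          days_loop _ year1 0
      _ = 365 * (year2 - year1) + pvLeaps (year2 - 1) - pvLeaps (year1 - 1) := by
          rw [← hn]; omega
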